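-- pv_equiv track=rewrite | github.com/MoShimer96/ohjelmoinnin_perusteet_kes-_24 | L06/L06T5.py | analyysi
-- ===== SOURCE A (Python) =====
-- def analyysi(dataAnalysoitavaksi):
--     """Data on muotoa: Sessio;Hahmo;Noppien määrä;Noppa;Noppien silmäluvut"""
--     heittojenMaara = 0
--     puhdasDataLista = []
--     analyysiTulos = {}
--
--     # Skip the first row
--     for i in range(1, len(dataAnalysoitavaksi)):
--         data_split = dataAnalysoitavaksi[i].split(";")
--         puhdasDataLista.append({data_split[3].strip(): int(data_split[2].strip())})
--
--
--
--
--     for item in puhdasDataLista: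
--         for key, value in item.items():
--             if key in analyysiTulos:
--                 analyysiTulos[key] += value
--                 heittojenMaara += value
--             else:
--                 analyysiTulos[key] = value
--                 heittojenMaara += value
--
--
--     """aliohjelma palauttaa dict, joka on muotoa {noppa: heittojen märää} ja tämän lisäksi se palauttaa
--     int, joka sisältää heittojen määrää"""
--     return analyysiTulos, heittojenMaara
-- ===== SOURCE B (Python) =====
-- def analyysi(dataAnalysoitavaksi):
--     """Data on muotoa: Sessio;Hahmo;Noppien määrä;Noppa;Noppien silmäluvut"""
--     analyysiTulos = {}
--     heittojenMaara = 0
--     for rivi in dataAnalysoitavaksi[1:]: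
--         osat = rivi.split(";")
--         avain = osat[3].strip()
--         arvo = int(osat[2].strip())
--         analyysiTulos[avain] = analyysiTulos.get(avain, 0) + arvo
--         heittojenMaara += arvo
--     return analyysiTulos, heittojenMaara
-- ===== Notes on version B (the rewrite author's own statement) =====
-- stated objective: simpler
-- what changed: One fused pass over the tail rows accumulating directly into the result dict via get(key,0)+value, eliminating A's intermediate list of single-key dicts, its second aggregation loop and the redundant if/else branch.
import Mathlib
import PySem

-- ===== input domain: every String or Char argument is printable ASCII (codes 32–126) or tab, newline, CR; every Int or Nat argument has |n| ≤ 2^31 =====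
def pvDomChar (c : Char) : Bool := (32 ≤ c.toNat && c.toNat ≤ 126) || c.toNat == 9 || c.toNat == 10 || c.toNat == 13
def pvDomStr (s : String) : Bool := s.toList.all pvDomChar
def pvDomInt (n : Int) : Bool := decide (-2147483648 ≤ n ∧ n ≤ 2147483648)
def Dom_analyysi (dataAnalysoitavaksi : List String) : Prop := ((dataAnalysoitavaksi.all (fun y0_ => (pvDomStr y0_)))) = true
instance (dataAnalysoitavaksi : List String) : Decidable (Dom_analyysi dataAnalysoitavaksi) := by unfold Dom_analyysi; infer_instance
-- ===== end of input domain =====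

-- B fuses A's two loops into one pass that accumulates directly into the result dict,
-- dropping the intermediate list of single-key dicts and the redundant if/else (objective: simpler).

-- ===== PORT A =====
def analyysi (dataAnalysoitavaksi : List String) : (List (String × Int)) × Int :=
  -- heittojenMaara = 0; puhdasDataLista = []; analyysiTulos = {}
  -- first loop: for i in range(1, len(...)): append one-key dict
  let puhdasDataLista : List (PySem.Dict String Int) :=
    (PySem.List.pyRange 1 (dataAnalysoitavaksi.length : Int) 1).foldl
      (fun acc i =>
        let data_split := (PySem.Str.split? ((PySem.List.pyGet? dataAnalysoitavaksi i).getD "") ";").getD []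
        acc ++ [PySem.Dict.insert PySem.Dict.empty
                  (PySem.Str.strip ((PySem.List.pyGet? data_split 3).getD ""))
                  ((PySem.Int.ofStr? (PySem.Str.strip ((PySem.List.pyGet? data_split 2).getD ""))).getD 0)])
      []
  -- second loop: aggregate
  let st : PySem.Dict String Int × Int :=
    puhdasDataLista.foldl
      (fun st item =>
        item.items.foldl
          (fun st kv =>
            if st.1.contains kv.1 then
              (st.1.insert kv.1 (st.1.getD kv.1 0 + kv.2), st.2 + kv.2)
            else
              (st.1.insert kv.1 kv.2, st.2 + kv.2))
          st)
      (PySem.Dict.empty, 0)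
  (st.1.items, st.2)

-- ===== PORT B =====
def analyysi_alt (dataAnalysoitavaksi : List String) : (List (String × Int)) × Int :=
  let st : PySem.Dict String Int × Int :=
    (PySem.List.slice dataAnalysoitavaksi (some 1) none).foldl
      (fun st rivi =>
        let osat := (PySem.Str.split? rivi ";").getD []
        let avain := PySem.Str.strip ((PySem.List.pyGet? osat 3).getD "")
        let arvo := (PySem.Int.ofStr? (PySem.Str.strip ((PySem.List.pyGet? osat 2).getD ""))).getD 0
        (st.1.insert avain (st.1.getD avain 0 + arvo), st.2 + arvo))
      (PySem.Dict.empty, 0)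
  (st.1.items, st.2)

-- ===== PRECONDITION & SPEC =====
-- Pre_: every row after the header splits on ';' into at least 4 fields and its third field
-- parses as an int — exactly where A's data_split[3] / int(...) do not raise IndexError/ValueError.
def Pre_analyysi (dataAnalysoitavaksi : List String) : Prop :=
  ∀ rivi ∈ dataAnalysoitavaksi.drop 1,
    4 ≤ ((PySem.Str.split? rivi ";").getD []).length ∧
    (PySem.Int.ofStr? (PySem.Str.strip (((PySem.Str.split? rivi ";").getD []).getD 2 ""))).isSome
instance (dataAnalysoitavaksi : List String) : Decidable (Pre_analyysi dataAnalysoitavaksi) := by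
  unfold Pre_analyysi; infer_instance
def pvWitness_analyysi : List String :=
  ["Sessio;Hahmo;Maara;Noppa;Silmat", "1;Aku; 3 ;d6;1,2,3", "1;Aku;2;d20;7,9", "2;Hupu;1;d6;5"]
def Spec_analyysi (dataAnalysoitavaksi : List String) (out : (List (String × Int)) × Int) : Prop := out = analyysi_alt dataAnalysoitavaksi
instance (dataAnalysoitavaksi : List String) (out : (List (String × Int)) × Int) : Decidable (Spec_analyysi dataAnalysoitavaksi out) := by unfold Spec_analyysi; infer_instance

-- ===== CLAIM (what is proved, stated in full; the proofs are below) =====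
def Claim_equal_analyysi : Prop := ∀ (dataAnalysoitavaksi : List String), Dom_analyysi dataAnalysoitavaksi → Pre_analyysi dataAnalysoitavaksi → Spec_analyysi dataAnalysoitavaksi (analyysi dataAnalysoitavaksi)



-- ===== LEMMAS AND PROOFS =====

-- range(a, len(xs)) indexing of xs is xs.drop a
theorem pv_map_pyGet_range (xs : List String) : ∀ (k a : Nat), xs.length - a = k →
    (PySem.List.pyRange (a : Int) (xs.length : Int) 1).map
      (fun i => (PySem.List.pyGet? xs i).getD "") = xs.drop a := by
  intro k
  induction k with
  | zero =>
    intro a ha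
    have h1 : (xs.length : Int) ≤ (a : Int) := by exact_mod_cast Nat.le_of_sub_eq_zero ha
    have h2 : xs.length ≤ a := by omega
    simp [pysem, h1, List.drop_eq_nil_of_le h2]
  | succ n ih =>
    intro a ha
    have hlt : a < xs.length := by omega
    have hlt' : (a : Int) < (xs.length : Int) := by exact_mod_cast hlt
    rw [PySem.List.pyRange_one_cons hlt', List.map_cons]
    have hcast : ((a : Int) + 1) = ((a + 1 : Nat) : Int) := by push_cast; ring
    rw [hcast, ih (a + 1) (by omega), List.drop_eq_getElem_cons hlt]
    congr 1
    rw [PySem.List.pyGet?_natCast, List.getElem?_eq_getElem hlt]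
    rfl

-- A's index loop over range(1, len(xs)) is a map over xs.drop 1
theorem pv_first_loop {β : Type} (xs : List String) (g : String → β) :
    (PySem.List.pyRange 1 (xs.length : Int) 1).map
      (fun i => g ((PySem.List.pyGet? xs i).getD "")) = (xs.drop 1).map g := by
  have h := pv_map_pyGet_range xs (xs.length - 1) 1 rfl
  simp only [Nat.cast_one] at h
  rw [← h, List.map_map]
  rfl

theorem analyysi_spec : Claim_equal_analyysi := by
  intro xs _ _
  unfold Spec_analyysi analyysi analyysi_alt
  simp only [PySem.List.foldl_append_singleton_eq_map, List.nil_append]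
  rw [pv_first_loop xs (fun rivi =>
        PySem.Dict.insert PySem.Dict.empty (PySem.Str.strip ((PySem.List.pyGet? ((PySem.Str.split? rivi ";").getD []) 3).getD "")) ((PySem.Int.ofStr? (PySem.Str.strip ((PySem.List.pyGet? ((PySem.Str.split? rivi ";").getD []) 2).getD ""))).getD 0)),
      List.foldl_map]
  have hslice : PySem.List.slice xs (some 1) none = xs.drop 1 := by
    simpa [← List.drop_one] using PySem.List.slice_from_one xs
  rw [hslice]
  rw [PySem.List.foldl_congr_mem (g := fun (st : PySem.Dict String Int × Int) rivi =>
        (st.1.insert (PySem.Str.strip ((PySem.List.pyGet? ((PySem.Str.split? rivi ";").getD []) 3).getD "")) (st.1.getD (PySem.Str.strip ((PySem.List.pyGet? ((PySem.Str.split? rivi ";").getD []) 3).getD "")) 0 + ((PySem.Int.ofStr? (PySem.Str.strip ((PySem.List.pyGet? ((PySem.Str.split? rivi ";").getD []) 2).getD ""))).getD 0)), st.2 + ((PySem.Int.ofStr? (PySem.Str.strip ((PySem.List.pyGet? ((PySem.Str.split? rivi ";").getD []) 2).getD ""))).getD 0)))]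
  intro st rivi _
  set k := PySem.Str.strip ((PySem.List.pyGet? ((PySem.Str.split? rivi ";").getD []) 3).getD "") with hk
  set v := (PySem.Int.ofStr? (PySem.Str.strip ((PySem.List.pyGet? ((PySem.Str.split? rivi ";").getD []) 2).getD ""))).getD 0 with hv
  have hitems : (PySem.Dict.insert (PySem.Dict.empty) k v).items = [(k, v)] := by
    simp [PySem.Dict.items_insert_of_not_contains, PySem.Dict.empty]
  rw [hitems, List.foldl_cons, List.foldl_nil]
  by_cases hc : st.1.contains k = true
  · simp [hc]
  · simp only [Bool.not_eq_true] at hc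
    simp [hc, PySem.Dict.getD_of_not_contains _ _ hc]
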